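-- pv_equiv track=rewrite | github.com/debdeephub/Asus | 4. 2D Arrays/CN_Summed_matrix.py | query
-- ===== SOURCE A (Python) =====
-- def query(n, q):
--     # Write your code here
--     # Return the number of cells having value ‘q’.
--     c =  0
--     matrix = [[0]*n for j in range(n)]
--
--     for i in range(n):
--         for j in range(n):
--             matrix[i][j] = i+j+2
--             if matrix[i][j]==q:
--                 c+=1
--     return c
-- ===== SOURCE B (Python) =====
-- def query(n, q):
--     # Cell (i, j) holds i + j + 2; count integer solutions of i + j = q - 2
--     # with 0 <= i, j <= n - 1 in closed form.
--     if n <= 0: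
--         return 0
--     s = q - 2
--     lo = max(0, s - (n - 1))
--     hi = min(s, n - 1)
--     return max(0, hi - lo + 1)
-- ===== Notes on version B (the rewrite author's own statement) =====
-- stated objective: faster
-- what changed: Replaced the O(n^2) double loop that materialises the whole n x n matrix with an O(1) closed-form count of the solutions of i + j = q - 2 with 0 <= i, j <= n - 1.
import Mathlib
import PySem

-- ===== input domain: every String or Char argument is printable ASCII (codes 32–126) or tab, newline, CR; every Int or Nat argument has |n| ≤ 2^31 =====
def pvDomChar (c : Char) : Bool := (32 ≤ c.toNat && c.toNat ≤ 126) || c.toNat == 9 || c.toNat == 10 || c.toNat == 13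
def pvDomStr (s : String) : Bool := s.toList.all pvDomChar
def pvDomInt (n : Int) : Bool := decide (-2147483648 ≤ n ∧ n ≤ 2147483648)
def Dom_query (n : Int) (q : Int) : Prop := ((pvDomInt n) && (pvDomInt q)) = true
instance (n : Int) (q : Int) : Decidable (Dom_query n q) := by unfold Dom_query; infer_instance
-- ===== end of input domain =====

-- B replaces A's O(n^2) matrix-filling double loop by a closed-form count of the
-- solutions of i + j = q - 2 with 0 ≤ i, j ≤ n - 1 (objective: faster, asymptotic).

-- ===== PORT A =====
-- one body of A's inner loop: 'matrix[i][j] = i+j+2; if matrix[i][j]==q: c+=1'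
-- (i, j come from range(n), hence nonnegative, so .toNat for List.set is exact)
def queryStep (q i : Int) (st : List (List Int) × Int) (j : Int) : List (List Int) × Int :=
  let m := st.1.set i.toNat ((PySem.List.pyGetD st.1 i []).set j.toNat (i + j + 2))
  let c := if PySem.List.pyGetD (PySem.List.pyGetD m i []) j 0 == q then st.2 + 1 else st.2
  (m, c)

def query (n : Int) (q : Int) : Int :=
  -- matrix = [[0]*n for j in range(n)]
  let matrix : List (List Int) := (PySem.List.pyRange 0 n 1).map (fun _ => PySem.List.pyRepeat [(0 : Int)] n)
  let res := (PySem.List.pyRange 0 n 1).foldl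
    (fun st i => (PySem.List.pyRange 0 n 1).foldl (queryStep q i) st) (matrix, 0)
  res.2

-- ===== PORT B =====
def query_alt (n : Int) (q : Int) : Int :=
  if n ≤ 0 then 0
  else
    let s := q - 2
    let lo := max 0 (s - (n - 1))
    let hi := min s (n - 1)
    max 0 (hi - lo + 1)

-- ===== PRECONDITION & SPEC =====
def Spec_query (n : Int) (q : Int) (out : Int) : Prop := out = query_alt n q
instance (n : Int) (q : Int) (out : Int) : Decidable (Spec_query n q out) := by unfold Spec_query; infer_instance

-- ===== CLAIM (what is proved, stated in full; the proofs are below) =====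
def Claim_equal_query : Prop := ∀ (n : Int) (q : Int), Dom_query n q → Spec_query n q (query n q)

-- ===== LEMMAS AND PROOFS =====

-- matrix shape: N rows, each of length N
def MShape (m : List (List Int)) (N : Nat) : Prop := m.length = N ∧ ∀ r ∈ m, r.length = N

lemma queryStep_eq (q i j : Int) (N : Nat) (m : List (List Int)) (c : Int)
    (hm : MShape m N) (hi0 : 0 ≤ i) (hiN : i.toNat < N) (hj0 : 0 ≤ j) (hjN : j.toNat < N) :
    queryStep q i (m, c) j =
      (m.set i.toNat ((PySem.List.pyGetD m i []).set j.toNat (i + j + 2)),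
       if i + j + 2 == q then c + 1 else c) ∧
    MShape (m.set i.toNat ((PySem.List.pyGetD m i []).set j.toNat (i + j + 2))) N := by
  obtain ⟨hlen, hrows⟩ := hm
  have hiN' : i.toNat < m.length := by omega
  have hiI : i < (m.length : Int) := by omega
  have hrow : PySem.List.pyGetD m i ([] : List Int) = m[i.toNat] :=
    PySem.List.pyGetD_eq_getElem m [] hi0 hiI
  have hrlen : (m[i.toNat]).length = N := hrows _ (List.getElem_mem hiN')
  have hread : PySem.List.pyGetD
      (PySem.List.pyGetD (m.set i.toNat ((PySem.List.pyGetD m i []).set j.toNat (i + j + 2))) i [])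
      j 0 = i + j + 2 := by
    have h1 : PySem.List.pyGetD (m.set i.toNat ((PySem.List.pyGetD m i []).set j.toNat (i + j + 2))) i ([] : List Int)
        = (PySem.List.pyGetD m i []).set j.toNat (i + j + 2) := by
      rw [PySem.List.pyGetD_eq_getElem _ [] hi0 (by simpa using hiI)]
      simp [List.getElem_set_self]
    rw [h1, hrow]
    rw [PySem.List.pyGetD_eq_getElem _ 0 hj0 (by simp [hrlen]; omega)]
    simp
  constructor
  · simp only [queryStep, hread]
  · constructor
    · simpa using hlen
    · intro r hr
      rcases List.mem_or_eq_of_mem_set hr with h | h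
      · exact hrows r h
      · subst h; rw [List.length_set, hrow, hrlen]

lemma inner_fold (n q i : Int) (N : Nat) (hi0 : 0 ≤ i) (hiN : i.toNat < N) :
    ∀ (L : List Int), (∀ j ∈ L, 0 ≤ j ∧ j < n ∧ j.toNat < N) →
    ∀ (m : List (List Int)) (c : Int), MShape m N →
    (L.foldl (queryStep q i) (m, c)).2
        = c + (L.countP (fun j => i + j + 2 == q) : Int) ∧
    MShape (L.foldl (queryStep q i) (m, c)).1 N := by
  intro L
  induction L with
  | nil => intro _ m c hm; simpa using hm
  | cons j L ih =>
    intro hjs m c hm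
    have hj := hjs j (by simp)
    obtain ⟨hstep, hshape⟩ := queryStep_eq q i j N m c hm hi0 hiN hj.1 hj.2.2
    have hrest := ih (fun x hx => hjs x (by simp [hx]))
        (m.set i.toNat ((PySem.List.pyGetD m i []).set j.toNat (i + j + 2)))
        (if i + j + 2 == q then c + 1 else c) hshape
    simp only [List.foldl_cons, hstep]
    refine ⟨?_, hrest.2⟩
    rw [hrest.1, List.countP_cons]
    by_cases hq : i + j + 2 = q <;> simp [hq] <;> try ring

lemma outer_fold (n q : Int) (N : Nat) (hN : n ≤ (N : Int)) :
    ∀ (L : List Int), (∀ i ∈ L, 0 ≤ i ∧ i < n ∧ i.toNat < N) →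
    ∀ (m : List (List Int)) (c : Int), MShape m N →
    (L.foldl (fun st i => (PySem.List.pyRange 0 n 1).foldl (queryStep q i) st) (m, c)).2
      = c + ((L.map (fun i => ((PySem.List.pyRange 0 n 1).countP (fun j => i + j + 2 == q) : Int))).sum) ∧
    MShape (L.foldl (fun st i => (PySem.List.pyRange 0 n 1).foldl (queryStep q i) st) (m, c)).1 N := by
  intro L
  induction L with
  | nil => intro _ m c hm; simpa using hm
  | cons i L ih =>
    intro his m c hm
    have hi := his i (by simp)
    have hjs : ∀ j ∈ PySem.List.pyRange 0 n 1, 0 ≤ j ∧ j < n ∧ j.toNat < N := by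
      intro j hj; have := (PySem.List.mem_pyRange_one).1 hj
      refine ⟨by omega, by omega, by omega⟩
    obtain ⟨hc, hsh⟩ := inner_fold n q i N hi.1 hi.2.2 (PySem.List.pyRange 0 n 1) hjs m c hm
    simp only [List.foldl_cons]
    have heq : (PySem.List.pyRange 0 n 1).foldl (queryStep q i) (m, c)
        = ((((PySem.List.pyRange 0 n 1).foldl (queryStep q i) (m, c))).1,
           c + ((PySem.List.pyRange 0 n 1).countP (fun j => i + j + 2 == q) : Int)) := by
      rw [← hc]
    rw [heq]
    obtain ⟨hc2, hsh2⟩ := ih (fun x hx => his x (by simp [hx])) _ _ hsh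
    refine ⟨?_, hsh2⟩
    rw [hc2]; simp; ring

-- count of j ∈ range(n) with i + j + 2 = q
lemma countP_range (n i q : Int) :
    ((PySem.List.pyRange 0 n 1).countP (fun j => i + j + 2 == q) : Int)
      = if 0 ≤ q - 2 - i ∧ q - 2 - i < n then 1 else 0 := by
  have h1 : (PySem.List.pyRange 0 n 1).countP (fun j => i + j + 2 == q)
      = (PySem.List.pyRange 0 n 1).count (q - 2 - i) := by
    rw [List.count]
    apply List.countP_congr
    intro j _
    constructor <;> intro h <;> simp only [beq_iff_eq] at * <;> omega
  rw [h1]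
  by_cases hmem : (q - 2 - i) ∈ PySem.List.pyRange 0 n 1
  · have := (PySem.List.mem_pyRange_one).1 hmem
    rw [List.count_eq_one_of_mem (PySem.List.nodup_pyRange_one 0 n) hmem,
        if_pos (by omega : 0 ≤ q - 2 - i ∧ q - 2 - i < n)]
    simp
  · have hno : ¬ (0 ≤ q - 2 - i ∧ q - 2 - i < n) := by
      intro h; exact hmem ((PySem.List.mem_pyRange_one).2 (by omega))
    rw [List.count_eq_zero_of_not_mem hmem, if_neg hno]
    simp

lemma sum_indicator (A B : Int) :
    ∀ (k : Nat), ((List.range k).map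
        (fun (i : Nat) => if A ≤ (i : Int) ∧ (i : Int) ≤ B then (1 : Int) else 0)).sum
      = max 0 (min B ((k : Int) - 1) - max A 0 + 1) := by
  intro k
  induction k with
  | zero => simp only [List.range_zero, List.map_nil, List.sum_nil, Nat.cast_zero]; omega
  | succ k ih =>
    rw [List.range_succ, List.map_append, List.sum_append, ih]
    simp only [List.map_cons, List.map_nil, List.sum_cons, List.sum_nil]
    push_cast
    split_ifs with h <;> omega

theorem query_spec : Claim_equal_query := by
  intro n q _
  unfold Spec_query query query_alt
  by_cases hn : n ≤ 0
  · simp [PySem.List.pyRange_one_eq_nil hn, hn]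
  · push_neg at hn
    simp only [if_neg (by omega : ¬ n ≤ 0)]
    have hshape : MShape ((PySem.List.pyRange 0 n 1).map (fun _ => PySem.List.pyRepeat [(0 : Int)] n)) n.toNat := by
      constructor
      · simp [PySem.List.length_pyRange_one]
      · intro r hr
        simp only [List.mem_map] at hr
        obtain ⟨_, _, hr⟩ := hr
        rw [← hr, PySem.List.pyRepeat_singleton, List.length_replicate]
    have his : ∀ i ∈ PySem.List.pyRange 0 n 1, 0 ≤ i ∧ i < n ∧ i.toNat < n.toNat := by
      intro i hi; have := (PySem.List.mem_pyRange_one).1 hi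
      refine ⟨by omega, by omega, by omega⟩
    obtain ⟨hc, _⟩ := outer_fold n q n.toNat (by omega) (PySem.List.pyRange 0 n 1) his _ 0 hshape
    rw [hc]
    have hmap : (PySem.List.pyRange 0 n 1).map
          (fun i => ((PySem.List.pyRange 0 n 1).countP (fun j => i + j + 2 == q) : Int))
        = (List.range n.toNat).map
          (fun (i : Nat) => if (q - 1 - n) ≤ (i : Int) ∧ (i : Int) ≤ q - 2 then (1 : Int) else 0) := by
      have h1 : (PySem.List.pyRange 0 n 1).map
            (fun i => ((PySem.List.pyRange 0 n 1).countP (fun j => i + j + 2 == q) : Int))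
          = (PySem.List.pyRange 0 n 1).map
            (fun i => if (q - 1 - n) ≤ i ∧ i ≤ q - 2 then (1 : Int) else 0) := by
        apply List.map_congr_left
        intro i _
        rw [countP_range]
        split_ifs with ha hb <;> first | rfl | (exfalso; omega)
      rw [h1, PySem.List.pyRange_one 0 n]
      simp only [Int.sub_zero, List.map_map]
      apply List.map_congr_left
      intro i _
      simp only [Function.comp_apply, zero_add]
    rw [hmap, sum_indicator]
    have hcast : ((n.toNat : Int)) = n := by omega
    rw [hcast]
    omega
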